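-- pv_equiv track=rewrite | github.com/jannesuuronen/advent_of_code_2021 | Day 4/main.py | play_bingo
-- ===== SOURCE A (Python) =====
-- def play_bingo(board, numbers):
--     marked_matrix = [[0 for j in range(5)] for i in range(5)]
--     counter = 0
--     for number in numbers:
--         for i in range(0,5):
--             for j in range(0,5):
--                 if board[i][j] == number:
--                     marked_matrix[i][j] = 1
--         if counter >= 5:
--             if check_for_bingo(marked_matrix):
--                 return number, sum_unmarked(board, marked_matrix), counter
--         counter += 1
--     return 0, 0, 0
--
-- def sum_unmarked(board, marked_matrix):
--     sum = 0
--     for i in range(5):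
--         for j in range(5):
--             if marked_matrix[i][j] == 0:
--                 sum += board[i][j]
--     return sum
--
-- def check_for_bingo(marked_matrix):
--     col = 0
--     for row in marked_matrix:
--         if sum(row) == 5:
--             return True
--         elif sum([row[col] for row in marked_matrix]) == 5:
--             return True
--         col += 1
-- ===== SOURCE B (Python) =====
-- def play_bingo(board, numbers):
--     unmarked = sum(board[i][j] for i in range(5) for j in range(5))
--     row_counts = [0] * 5
--     col_counts = [0] * 5
--     marked = set()
--     for idx, number in enumerate(numbers):
--         for i in range(5):
--             for j in range(5):
--                 if board[i][j] == number and (i, j) not in marked: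
--                     marked.add((i, j))
--                     unmarked -= board[i][j]
--                     row_counts[i] += 1
--                     col_counts[j] += 1
--         if idx >= 5 and (5 in row_counts or 5 in col_counts):
--             return number, unmarked, idx
--     return 0, 0, 0
-- ===== Notes on version B (the rewrite author's own statement) =====
-- stated objective: alternative
-- what changed: Drops A's replay machinery (a 0/1 marked matrix whose rows and columns are re-summed on every draw and a final full re-scan for the unmarked sum) for incremental state: the board total is summed once, and each newly marked cell just decrements a running unmarked sum and bumps per-row/per-column counters, so the bingo test is '5 in row_counts or 5 in col_counts' and the unmarked sum is already at hand when bingo hits.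
-- outside the precondition, e.g. on play_bingo([], []): A returns (0, 0, 0), B raises IndexError
import Mathlib
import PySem

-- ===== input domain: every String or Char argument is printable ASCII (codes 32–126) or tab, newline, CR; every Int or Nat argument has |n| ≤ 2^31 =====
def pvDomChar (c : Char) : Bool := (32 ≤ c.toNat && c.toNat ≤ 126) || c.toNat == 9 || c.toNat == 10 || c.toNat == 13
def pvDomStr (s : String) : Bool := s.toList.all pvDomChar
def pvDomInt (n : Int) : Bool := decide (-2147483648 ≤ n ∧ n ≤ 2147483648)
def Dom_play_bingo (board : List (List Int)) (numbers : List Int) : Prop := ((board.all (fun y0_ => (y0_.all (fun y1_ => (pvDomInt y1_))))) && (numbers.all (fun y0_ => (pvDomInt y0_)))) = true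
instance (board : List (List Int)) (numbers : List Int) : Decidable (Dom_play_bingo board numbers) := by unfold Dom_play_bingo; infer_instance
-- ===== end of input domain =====

-- B replaces A's replay machinery (a 0/1 marked matrix whose rows and columns are RE-SUMMED on every
-- draw to test for bingo, and a final full re-scan to sum the unmarked cells) by incremental state:
-- the board total is summed once, and per marked cell B merely decrements a running unmarked sum and
-- bumps per-row/per-column mark counters, so the bingo test is '5 in row_counts or 5 in col_counts'
-- and the unmarked sum is already at hand (objective: alternative; same asymptotic cost).

-- ===== PORT A =====

-- board[i][j] for the loops' nonnegative indices (out-of-range raises in Python; excluded by Pre_)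
def cellA (board : List (List Int)) (i j : Nat) : Int := (board.getD i []).getD j 0

-- the two nested marking loops: for i in range(0,5): for j in range(0,5): if board[i][j]==number: marked[i][j]=1
def markA (board : List (List Int)) (number : Int) (m : List (List Int)) : List (List Int) :=
  (List.range 5).foldl (fun m i =>
    (List.range 5).foldl (fun m j =>
      if cellA board i j == number then m.modify i (fun row => row.set j 1) else m) m) m

-- check_for_bingo's loop over rows carrying the col counter
def checkLoopA (m : List (List Int)) : List (List Int) → Nat → Bool
  | [], _ => false
  | row :: rest, col =>
    if row.sum == 5 then true
    else if (m.map (fun r => r.getD col 0)).sum == 5 then true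
    else checkLoopA m rest (col + 1)

def sum_unmarkedA (board m : List (List Int)) : Int :=
  (List.range 5).foldl (fun s i =>
    (List.range 5).foldl (fun s j =>
      if (m.getD i []).getD j 0 == 0 then s + cellA board i j else s) s) 0

def loopA (board : List (List Int)) : List Int → List (List Int) → Int → Int × Int × Int
  | [], _, _ => (0, 0, 0)
  | number :: rest, m, counter =>
    let m' := markA board number m
    if 5 ≤ counter then
      if checkLoopA m' m' 0 then (number, sum_unmarkedA board m', counter)
      else loopA board rest m' (counter + 1)
    else loopA board rest m' (counter + 1)

def play_bingo (board : List (List Int)) (numbers : List Int) : Int × Int × Int :=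
  loopA board numbers ((List.range 5).map (fun _ => (List.range 5).map (fun _ => (0 : Int)))) 0

-- ===== PORT B =====

-- board[i][j] in B's loops (same Python indexing expression; out-of-range raises, excluded by Pre_)
def cellB (board : List (List Int)) (i j : Nat) : Int := (board.getD i []).getD j 0

-- the body of B's marking scan over state (unmarked, row_counts, col_counts, marked):
-- if board[i][j] == number and (i, j) not in marked: mark it, adjust sum and both counters
def bodyB (board : List (List Int)) (number : Int)
    (st : Int × List Int × List Int × PySem.Set (Nat × Nat)) (i j : Nat) :
    Int × List Int × List Int × PySem.Set (Nat × Nat) :=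
  match st with
  | (u, rows, cols, marked) =>
    if cellB board i j == number && !(PySem.Set.contains marked (i, j)) then
      (u - cellB board i j, rows.modify i (· + 1), cols.modify j (· + 1),
        PySem.Set.add marked (i, j))
    else (u, rows, cols, marked)

-- for i in range(5): for j in range(5): …
def stepB (board : List (List Int)) (number : Int)
    (st : Int × List Int × List Int × PySem.Set (Nat × Nat)) :
    Int × List Int × List Int × PySem.Set (Nat × Nat) :=
  (List.range 5).foldl (fun st i =>
    (List.range 5).foldl (fun st j => bodyB board number st i j) st) st

-- for idx, number in enumerate(numbers): … if idx >= 5 and (5 in row_counts or 5 in col_counts): …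
def loopB (board : List (List Int)) :
    List Int → Int → Int × List Int × List Int × PySem.Set (Nat × Nat) → Int × Int × Int
  | [], _, _ => (0, 0, 0)
  | number :: rest, idx, st =>
    let st' := stepB board number st
    if 5 ≤ idx ∧ (st'.2.1.contains 5 || st'.2.2.1.contains 5) then (number, st'.1, idx)
    else loopB board rest (idx + 1) st'

-- unmarked starts at sum(board[i][j] for i in range(5) for j in range(5)); counters start at [0]*5
def play_bingo_alt (board : List (List Int)) (numbers : List Int) : Int × Int × Int :=
  loopB board numbers 0
    (((List.range 5).map (fun i => ((List.range 5).map (fun j => cellB board i j)).sum)).sum,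
      List.replicate 5 0, List.replicate 5 0, PySem.Set.empty)

-- ===== PRECONDITION & SPEC =====
-- Pre_ requires a real 5x5 bingo board (at least 5 rows, the first five each with at least 5 cells):
-- off it A raises IndexError at board[i][j] whenever numbers is nonempty, and B's up-front total sum
-- raises there too; the sole excluded inputs A still returns on are malformed boards with
-- numbers = [], where A returns (0, 0, 0) without ever touching the board while B raises.
def Pre_play_bingo (board : List (List Int)) (numbers : List Int) : Prop :=
  5 ≤ board.length ∧ ∀ row ∈ board.take 5, 5 ≤ row.length
instance (board : List (List Int)) (numbers : List Int) : Decidable (Pre_play_bingo board numbers) := by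
  unfold Pre_play_bingo; infer_instance

def pvWitness_play_bingo : List (List Int) × List Int :=
  ([[1,2,3,4,5],[6,7,8,9,10],[11,12,13,14,15],[16,17,18,19,20],[21,22,23,24,25]], [1,2,3,4,5,6])

def Spec_play_bingo (board : List (List Int)) (numbers : List Int) (out : Int × Int × Int) : Prop := out = play_bingo_alt board numbers
instance (board : List (List Int)) (numbers : List Int) (out : Int × Int × Int) : Decidable (Spec_play_bingo board numbers out) := by unfold Spec_play_bingo; infer_instance

-- ===== CLAIM (what is proved, stated in full; the proofs are below) =====
def Claim_equal_play_bingo : Prop := ∀ (board : List (List Int)) (numbers : List Int), Dom_play_bingo board numbers → Pre_play_bingo board numbers → Spec_play_bingo board numbers (play_bingo board numbers)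

-- ===== LEMMAS AND PROOFS =====

-- entry (i,j) of a list-of-lists, and the 5x5 shape A's marked matrix keeps
def Ent (m : List (List Int)) (i j : Nat) : Int := (m.getD i []).getD j 0

def Shape5 (m : List (List Int)) : Prop := m.length = 5 ∧ ∀ r ∈ m, r.length = 5

-- A's marked matrix is the indicator of "this board cell was drawn"
def InvM (board : List (List Int)) (m : List (List Int)) (S : PySem.Set Int) : Prop :=
  Shape5 m ∧ ∀ i j, i < 5 → j < 5 →
    Ent m i j = if cellA board i j ∈ S then (1 : Int) else 0

-- B's abstract quantities, parameterised by the predicate "cell (i,j) is marked"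
def rowCntQ (Q : Nat → Nat → Bool) (i : Nat) : Int :=
  ((List.range 5).map (fun j => if Q i j then (1 : Int) else 0)).sum

def colCntQ (Q : Nat → Nat → Bool) (j : Nat) : Int :=
  ((List.range 5).map (fun i => if Q i j then (1 : Int) else 0)).sum

def uSumQ (board : List (List Int)) (Q : Nat → Nat → Bool) : Int :=
  ((List.range 5).map (fun i =>
    ((List.range 5).map (fun j => if Q i j then 0 else cellB board i j)).sum)).sum

def InvB (board : List (List Int)) (st : Int × List Int × List Int × PySem.Set (Nat × Nat))
    (Q : Nat → Nat → Bool) : Prop :=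
  st.2.1.length = 5 ∧ st.2.2.1.length = 5 ∧
  (∀ i j : Nat, ((i, j) ∈ st.2.2.2 ↔ i < 5 ∧ j < 5 ∧ Q i j = true)) ∧
  (∀ i, i < 5 → st.2.1.getD i 0 = rowCntQ Q i) ∧
  (∀ j, j < 5 → st.2.2.1.getD j 0 = colCntQ Q j) ∧
  st.1 = uSumQ board Q


theorem shape5_update (m : List (List Int)) (hm : Shape5 m) (i : Nat) (j : Nat) :
    Shape5 (m.modify i (fun row => row.set j 1)) := by
  obtain ⟨hlen, hrow⟩ := hm
  refine ⟨by simp [hlen], ?_⟩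
  intro r hr
  rw [List.mem_iff_getElem] at hr
  obtain ⟨k, hk, rfl⟩ := hr
  rw [List.getElem_modify]
  have hk' : k < m.length := by simpa using hk
  split
  · simp [hrow _ (List.getElem_mem hk')]
  · exact hrow _ (List.getElem_mem hk')

theorem ent_update (m : List (List Int)) (hm : Shape5 m) (i j i' j' : Nat)
    (hi' : i' < 5) (hj' : j' < 5) :
    Ent (m.modify i (fun row => row.set j 1)) i' j' =
      if i' = i ∧ j' = j then 1 else Ent m i' j' := by
  obtain ⟨hlen, hrow⟩ := hm
  have hi'm : i' < m.length := by omega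
  have hrl : m[i'].length = 5 := hrow _ (List.getElem_mem hi'm)
  have hj'r : j' < m[i'].length := by omega
  have hR : Ent m i' j' = m[i'][j'] := by
    unfold Ent; rw [List.getD_eq_getElem _ _ hi'm, List.getD_eq_getElem _ _ hj'r]
  have hlm : i' < (m.modify i fun row => row.set j 1).length := by simpa using hi'm
  have hL1 : Ent (m.modify i fun row => row.set j 1) i' j'
      = ((m.modify i fun row => row.set j 1)[i']).getD j' 0 := by
    unfold Ent; rw [List.getD_eq_getElem _ _ hlm]
  rw [hL1, hR, List.getElem_modify]
  by_cases hii : i = i'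
  · rw [if_pos hii]
    have hjs : j' < (m[i'].set j 1).length := by simp [hj'r]
    rw [List.getD_eq_getElem _ _ hjs, List.getElem_set]
    by_cases hjj : j = j'
    · simp_all
    · have : ¬ (i' = i ∧ j' = j) := fun h => hjj h.2.symm
      simp [hjj, this]
  · rw [if_neg hii, List.getD_eq_getElem _ _ hj'r]
    have : ¬ (i' = i ∧ j' = j) := fun h => hii h.1.symm
    simp [this]

theorem inner_char (board : List (List Int)) (number : Int) (i : Nat) :
    ∀ (js : List Nat) (m : List (List Int)), Shape5 m →
    Shape5 (js.foldl (fun m j => if cellA board i j == number then m.modify i (fun row => row.set j 1) else m) m) ∧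
    ∀ i' j', i' < 5 → j' < 5 →
      Ent (js.foldl (fun m j => if cellA board i j == number then m.modify i (fun row => row.set j 1) else m) m) i' j' =
        if i' = i ∧ j' ∈ js ∧ cellA board i j' = number then 1 else Ent m i' j' := by
  intro js
  induction js with
  | nil => intro m hm; exact ⟨hm, by intro i' j' _ _; simp⟩
  | cons j js ih =>
    intro m hm
    have hm1 : Shape5 (if cellA board i j == number then m.modify i (fun row => row.set j 1) else m) := by
      split
      · exact shape5_update m hm i j
      · exact hm
    obtain ⟨hsh, hent⟩ := ih _ hm1
    refine ⟨by simpa using hsh, ?_⟩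
    intro i' j' hi' hj'
    rw [List.foldl_cons]
    rw [hent i' j' hi' hj']
    by_cases h5 : cellA board i j == number
    · rw [if_pos h5, ent_update m hm i j i' j' hi' hj']
      have h5' : cellA board i j = number := by simpa using h5
      by_cases h1 : i' = i <;> by_cases h4 : j' = j <;>
        simp_all [List.mem_cons]
    · rw [if_neg h5]
      have h5' : ¬ cellA board i j = number := by simpa using h5
      by_cases h1 : i' = i <;> by_cases h4 : j' = j <;>
        simp_all [List.mem_cons]

theorem outer_char (board : List (List Int)) (number : Int) :
    ∀ (is : List Nat) (m : List (List Int)), Shape5 m →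
    Shape5 (is.foldl (fun m i => (List.range 5).foldl
        (fun m j => if cellA board i j == number then m.modify i (fun row => row.set j 1) else m) m) m) ∧
    ∀ i' j', i' < 5 → j' < 5 →
      Ent (is.foldl (fun m i => (List.range 5).foldl
        (fun m j => if cellA board i j == number then m.modify i (fun row => row.set j 1) else m) m) m) i' j' =
        if i' ∈ is ∧ cellA board i' j' = number then 1 else Ent m i' j' := by
  intro is
  induction is with
  | nil => intro m hm; exact ⟨hm, by intro i' j' _ _; simp⟩
  | cons i is ih =>
    intro m hm
    obtain ⟨hm1, hent1⟩ := inner_char board number i (List.range 5) m hm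
    obtain ⟨hsh, hent⟩ := ih _ hm1
    refine ⟨by simpa using hsh, ?_⟩
    intro i' j' hi' hj'
    rw [List.foldl_cons]
    rw [hent i' j' hi' hj', hent1 i' j' hi' hj']
    by_cases h1 : i' = i <;> by_cases h2 : i' ∈ is <;>
      simp_all [List.mem_range, List.mem_cons]

theorem mark_char (board : List (List Int)) (number : Int) (m : List (List Int)) (hm : Shape5 m) :
    Shape5 (markA board number m) ∧ ∀ i' j', i' < 5 → j' < 5 →
      Ent (markA board number m) i' j' =
        if cellA board i' j' = number then 1 else Ent m i' j' := by
  obtain ⟨hsh, hent⟩ := outer_char board number (List.range 5) m hm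
  refine ⟨hsh, ?_⟩
  intro i' j' hi' hj'
  unfold markA
  rw [hent i' j' hi' hj']
  simp [List.mem_range, hi']

theorem inv_mark (board : List (List Int)) (number : Int) (m : List (List Int)) (S : PySem.Set Int)
    (h : InvM board m S) : InvM board (markA board number m) (PySem.Set.add S number) := by
  obtain ⟨hm, hent⟩ := h
  obtain ⟨hsh, hmk⟩ := mark_char board number m hm
  refine ⟨hsh, ?_⟩
  intro i j hi hj
  rw [hmk i j hi hj, hent i j hi hj]
  by_cases hc : cellA board i j = number <;>
    by_cases hs : cellA board i j ∈ S <;>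
    simp [hc, hs, PySem.Set.mem_add]

theorem list_len5 {α : Type} (l : List α) (h : l.length = 5) :
    ∃ a b c d e : α, l = [a, b, c, d, e] := by
  match l, h with
  | [a, b, c, d, e], _ => exact ⟨a, b, c, d, e, rfl⟩

theorem sum5d (a b c d e : Prop) [Decidable a] [Decidable b] [Decidable c] [Decidable d] [Decidable e] :
    decide ((if a then (1:Int) else 0) + ((if b then (1:Int) else 0) + ((if c then (1:Int) else 0) +
      ((if d then (1:Int) else 0) + if e then (1:Int) else 0))) = 5)
    = (decide a && (decide b && (decide c && (decide d && decide e)))) := by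
  by_cases ha : a <;> by_cases hb : b <;> by_cases hc : c <;> by_cases hd : d <;> by_cases he : e <;>
    norm_num [ha, hb, hc, hd, he]

theorem or_interleave (a0 a1 a2 a3 a4 b0 b1 b2 b3 b4 : Bool) :
    (a0 || (b0 || (a1 || (b1 || (a2 || (b2 || (a3 || (b3 || (a4 || b4)))))))))
    = ((a0 || (a1 || (a2 || (a3 || a4)))) || (b0 || (b1 || (b2 || (b3 || b4))))) := by
  revert a0 a1 a2 a3 a4 b0 b1 b2 b3 b4; decide

-- generic: two range sums agreeing pointwise / differing at one index
theorem sum_range_map_congr (n : Nat) (f g : Nat → Int) (h : ∀ j, j < n → f j = g j) :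
    ((List.range n).map f).sum = ((List.range n).map g).sum := by
  congr 1
  apply List.map_congr_left
  intro j hj
  exact h j (List.mem_range.mp hj)

theorem sum_range_map_update (n b : Nat) (f g : Nat → Int) (hb : b < n)
    (h : ∀ j, j < n → j ≠ b → f j = g j) :
    ((List.range n).map f).sum = ((List.range n).map g).sum + (f b - g b) := by
  induction n with
  | zero => omega
  | succ n ih =>
    rw [List.range_succ, List.map_append, List.map_append, List.sum_append, List.sum_append]
    by_cases hbn : b = n
    · subst hbn
      rw [sum_range_map_congr b f g (fun j hj => h j (by omega) (by omega))]
      simp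
    · have hb' : b < n := by omega
      rw [ih hb' (fun j hj hne => h j (by omega) hne)]
      have hfg : f n = g n := h n (by omega) (fun he => hbn he.symm)
      simp [hfg]; ring

-- the marked predicate after drawing the numbers in S
def QS (board : List (List Int)) (S : PySem.Set Int) (i j : Nat) : Bool :=
  decide (cellB board i j ∈ S)


-- InvB only depends on Q's values on the 5x5 square
theorem invB_congr (board : List (List Int)) (st : Int × List Int × List Int × PySem.Set (Nat × Nat))
    (Q Q' : Nat → Nat → Bool) (h : ∀ i j, i < 5 → j < 5 → Q' i j = Q i j)
    (hinv : InvB board st Q) : InvB board st Q' := by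
  obtain ⟨h1, h2, hmem, hrow, hcol, hu⟩ := hinv
  refine ⟨h1, h2, ?_, ?_, ?_, ?_⟩
  · intro i j
    constructor
    · intro h0
      obtain ⟨hi, hj, hq⟩ := (hmem i j).1 h0
      exact ⟨hi, hj, by rw [h i j hi hj]; exact hq⟩
    · rintro ⟨hi, hj, hq⟩
      exact (hmem i j).2 ⟨hi, hj, by rw [← h i j hi hj]; exact hq⟩
  · intro i hi
    rw [hrow i hi]
    exact (sum_range_map_congr 5 _ _ (fun j hj => by rw [h i j hi hj])).symm
  · intro j hj
    rw [hcol j hj]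
    exact (sum_range_map_congr 5 _ _ (fun i hi => by rw [h i j hi hj])).symm
  · rw [hu]
    exact (sum_range_map_congr 5 _ _ (fun i hi =>
      sum_range_map_congr 5 _ _ (fun j hj => by rw [h i j hi hj]))).symm

theorem getD_modify (l : List Int) (a i : Nat) (f : Int → Int) (hi : i < l.length) :
    (l.modify a f).getD i 0 = if i = a then f (l.getD i 0) else l.getD i 0 := by
  have hi' : i < (l.modify a f).length := by simpa using hi
  rw [List.getD_eq_getElem _ _ hi', List.getD_eq_getElem _ _ hi, List.getElem_modify]
  by_cases h : i = a
  · simp [h]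
  · have h' : ¬ a = i := fun hh => h hh.symm
    simp [h, h']

-- one body step flips Q exactly at (a,b) when board[a][b] == number there
theorem body_inv (board : List (List Int)) (number : Int) (a b : Nat) (ha : a < 5) (hb : b < 5)
    (u : Int) (rows cols : List Int) (marked : PySem.Set (Nat × Nat)) (Q : Nat → Nat → Bool)
    (hinv : InvB board (u, rows, cols, marked) Q) :
    InvB board (bodyB board number (u, rows, cols, marked) a b)
      (fun i j => Q i j || (decide (i = a) && decide (j = b) && decide (cellB board a b = number))) := by
  obtain ⟨h1, h2, hmem, hrow, hcol, hu⟩ := hinv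
  dsimp only at h1 h2 hmem hrow hcol hu
  by_cases hcond : (cellB board a b == number && !(PySem.Set.contains marked (a, b))) = true
  · have hnum : cellB board a b = number := by
      have := hcond; simp at this; exact this.1
    have hnm : (a, b) ∉ marked := by
      have := hcond; simp at this
      intro hin
      exact absurd ((PySem.Set.contains_iff marked (a, b)).mpr hin) (by simp [this.2])
    have hQab : Q a b = false := by
      by_contra hq
      exact hnm ((hmem a b).2 ⟨ha, hb, by simpa using hq⟩)
    have hred : bodyB board number (u, rows, cols, marked) a b =
        (u - cellB board a b, rows.modify a (· + 1), cols.modify b (· + 1),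
          PySem.Set.add marked (a, b)) := by
      simp only [bodyB]
      rw [if_pos hcond]
    rw [hred]
    refine ⟨by simpa using h1, by simpa using h2, ?_, ?_, ?_, ?_⟩
    · intro i j
      rw [PySem.Set.mem_add marked (a, b) (i, j)]
      constructor
      · rintro (hm | he)
        · obtain ⟨hi, hj, hq⟩ := (hmem i j).1 hm
          exact ⟨hi, hj, by simp [hq]⟩
        · obtain ⟨rfl, rfl⟩ := Prod.mk.injEq .. ▸ he
          exact ⟨ha, hb, by simp [hnum]⟩
      · rintro ⟨hi, hj, hq⟩
        simp only [Bool.or_eq_true, Bool.and_eq_true, decide_eq_true_eq] at hq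
        rcases hq with hq | ⟨⟨hia, hjb⟩, _⟩
        · exact Or.inl ((hmem i j).2 ⟨hi, hj, hq⟩)
        · exact Or.inr (by simp [hia, hjb])
    · intro i hi
      show (rows.modify a (· + 1)).getD i 0 = _
      rw [getD_modify rows a i _ (by omega)]
      by_cases hia : i = a
      · rw [if_pos hia]
        simp only [hrow i hi]
        unfold rowCntQ
        rw [sum_range_map_update 5 b
            (fun j => if (Q i j || (decide (i = a) && decide (j = b) &&
              decide (cellB board a b = number))) then (1:Int) else 0)
            (fun j => if Q i j then (1:Int) else 0) hb (fun j _ hne => by simp [hne])]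
        simp [hia, hnum, hQab]
      · rw [if_neg hia, hrow i hi]
        unfold rowCntQ
        exact (sum_range_map_congr 5 _ _ (fun j hj => by simp [hia])).symm
    · intro j hj
      show (cols.modify b (· + 1)).getD j 0 = _
      rw [getD_modify cols b j _ (by omega)]
      by_cases hjb : j = b
      · rw [if_pos hjb]
        simp only [hcol j hj]
        unfold colCntQ
        rw [sum_range_map_update 5 a
            (fun i => if (Q i j || (decide (i = a) && decide (j = b) &&
              decide (cellB board a b = number))) then (1:Int) else 0)
            (fun i => if Q i j then (1:Int) else 0) ha (fun i _ hne => by simp [hne])]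
        simp [hjb, hnum, hQab]
      · rw [if_neg hjb, hcol j hj]
        unfold colCntQ
        exact (sum_range_map_congr 5 _ _ (fun i hi => by simp [hjb])).symm
    · show u - cellB board a b = _
      have hinner : ((List.range 5).map (fun j => if (Q a j || (decide (a = a) && decide (j = b) &&
            decide (cellB board a b = number))) then (0:Int) else cellB board a j)).sum
          = ((List.range 5).map (fun j => if Q a j then (0:Int) else cellB board a j)).sum
            + (0 - cellB board a b) := by
        rw [sum_range_map_update 5 b
            (fun j => if (Q a j || (decide (a = a) && decide (j = b) &&
              decide (cellB board a b = number))) then (0:Int) else cellB board a j)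
            (fun j => if Q a j then (0:Int) else cellB board a j) hb (fun j _ hne => by simp [hne])]
        simp [hQab, hnum]
      have houter := sum_range_map_update 5 a
          (fun i => ((List.range 5).map (fun j => if (Q i j || (decide (i = a) && decide (j = b) &&
            decide (cellB board a b = number))) then (0:Int) else cellB board i j)).sum)
          (fun i => ((List.range 5).map (fun j => if Q i j then (0:Int) else cellB board i j)).sum)
          ha (fun i _ hne => sum_range_map_congr 5 _ _ (fun j _ => by simp [hne]))
      beta_reduce at houter
      rw [hu]
      unfold uSumQ
      rw [houter, hinner]
      ring
  · have hred : bodyB board number (u, rows, cols, marked) a b = (u, rows, cols, marked) := by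
      simp only [bodyB]
      rw [if_neg hcond]
    rw [hred]
    apply invB_congr board _ Q _ ?_ ⟨h1, h2, hmem, hrow, hcol, hu⟩
    intro i j hi hj
    simp only [Bool.and_eq_true, Bool.not_eq_true', beq_iff_eq] at hcond
    by_cases hia : i = a
    · by_cases hjb : j = b
      · subst hia; subst hjb
        by_cases hnum : cellB board i j = number
        · have hctn : PySem.Set.contains marked (i, j) = true := by
            rcases (not_and_or.mp hcond) with hc | hc
            · exact absurd hnum hc
            · simpa using hc
          have hq : Q i j = true := by
            obtain ⟨_, _, hq⟩ := (hmem i j).1 ((PySem.Set.contains_iff marked (i, j)).mp hctn)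
            exact hq
          simp [hq]
        · simp [hnum]
      · simp [hjb]
    · simp [hia]


-- the inner j-loop marks every matching cell of row a among js
theorem innerB (board : List (List Int)) (number : Int) (a : Nat) (ha : a < 5) :
    ∀ (js : List Nat), (∀ j ∈ js, j < 5) →
    ∀ (st : Int × List Int × List Int × PySem.Set (Nat × Nat)) (Q : Nat → Nat → Bool),
    InvB board st Q →
    InvB board (js.foldl (fun st j => bodyB board number st a j) st)
      (fun i j => Q i j || (decide (i = a) && decide (j ∈ js) && decide (cellB board a j = number))) := by
  intro js
  induction js with
  | nil =>
    intro _ st Q hinv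
    exact invB_congr board st Q _ (fun i j _ _ => by simp) hinv
  | cons j0 js ih =>
    intro hjs st Q hinv
    obtain ⟨u, rows, cols, marked⟩ := st
    have h0 := body_inv board number a j0 ha (hjs j0 (by simp)) u rows cols marked Q hinv
    have h1 := ih (fun j hj => hjs j (by simp [hj])) _ _ h0
    rw [List.foldl_cons]
    apply invB_congr board _ _ _ ?_ h1
    intro i j hi hj
    by_cases hia : i = a <;> by_cases hjj : j = j0 <;> by_cases hjm : j ∈ js <;>
      simp_all [List.mem_cons]

-- the outer i-loop over is
theorem outerB (board : List (List Int)) (number : Int) :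
    ∀ (is : List Nat), (∀ i ∈ is, i < 5) →
    ∀ (st : Int × List Int × List Int × PySem.Set (Nat × Nat)) (Q : Nat → Nat → Bool),
    InvB board st Q →
    InvB board (is.foldl (fun st i => (List.range 5).foldl
        (fun st j => bodyB board number st i j) st) st)
      (fun i j => Q i j || (decide (i ∈ is) && decide (j < 5) && decide (cellB board i j = number))) := by
  intro is
  induction is with
  | nil =>
    intro _ st Q hinv
    exact invB_congr board st Q _ (fun i j _ _ => by simp) hinv
  | cons i0 is ih =>
    intro his st Q hinv
    have h0 := innerB board number i0 (his i0 (by simp)) (List.range 5)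
      (fun j hj => List.mem_range.mp hj) st Q hinv
    have h1 := ih (fun i hi => his i (by simp [hi])) _ _ h0
    rw [List.foldl_cons]
    apply invB_congr board _ _ _ ?_ h1
    intro i j hi hj
    by_cases hia : i = i0 <;> by_cases him : i ∈ is <;>
      simp_all [List.mem_cons, List.mem_range]

-- one draw: B's marking scan moves the invariant from S to S.add number
theorem step_inv (board : List (List Int)) (number : Int)
    (st : Int × List Int × List Int × PySem.Set (Nat × Nat)) (S : PySem.Set Int)
    (hinv : InvB board st (QS board S)) :
    InvB board (stepB board number st) (QS board (PySem.Set.add S number)) := by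
  have h := outerB board number (List.range 5) (fun i hi => List.mem_range.mp hi) st _ hinv
  apply invB_congr board _ _ _ ?_ h
  intro i j hi hj
  simp [QS, PySem.Set.mem_add, List.mem_range, hi, hj]

-- the initial state satisfies the invariant for the empty drawn set
theorem init_inv (board : List (List Int)) :
    InvB board
      (((List.range 5).map (fun i => ((List.range 5).map (fun j => cellB board i j)).sum)).sum,
        List.replicate 5 0, List.replicate 5 0, PySem.Set.empty)
      (QS board PySem.Set.empty) := by
  refine ⟨by simp, by simp, ?_, ?_, ?_, ?_⟩
  · intro i j
    simp [PySem.Set.empty, QS]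
  · intro i hi
    interval_cases i <;> simp [rowCntQ, QS, PySem.Set.empty]
  · intro j hj
    interval_cases j <;> simp [colCntQ, QS, PySem.Set.empty]
  · simp [uSumQ, QS, PySem.Set.empty]



theorem sum5d' (a b c d e : Prop) [Decidable a] [Decidable b] [Decidable c] [Decidable d] [Decidable e] :
    decide ((5:Int) = (if a then (1:Int) else 0) + ((if b then (1:Int) else 0) + ((if c then (1:Int) else 0) +
      ((if d then (1:Int) else 0) + if e then (1:Int) else 0))))
    = (decide a && (decide b && (decide c && (decide d && decide e)))) := by
  by_cases ha : a <;> by_cases hb : b <;> by_cases hc : c <;> by_cases hd : d <;> by_cases he : e <;>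
    norm_num [ha, hb, hc, hd, he]

-- A's re-summed bingo test equals membership of 5 in B's running counters
theorem checkEq (board m : List (List Int)) (S : PySem.Set Int) (rows cols : List Int)
    (hm : InvM board m S) (hrl : rows.length = 5) (hcl : cols.length = 5)
    (hrow : ∀ i, i < 5 → rows.getD i 0 = rowCntQ (QS board S) i)
    (hcol : ∀ j, j < 5 → cols.getD j 0 = colCntQ (QS board S) j) :
    checkLoopA m m 0 = (rows.contains 5 || cols.contains 5) := by
  obtain ⟨⟨hml, hmr⟩, hent⟩ := hm
  obtain ⟨r0,r1,r2,r3,r4, rfl⟩ := list_len5 m hml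
  obtain ⟨x00,x01,x02,x03,x04, rfl⟩ := list_len5 r0 (hmr _ (by simp))
  obtain ⟨x10,x11,x12,x13,x14, rfl⟩ := list_len5 r1 (hmr _ (by simp))
  obtain ⟨x20,x21,x22,x23,x24, rfl⟩ := list_len5 r2 (hmr _ (by simp))
  obtain ⟨x30,x31,x32,x33,x34, rfl⟩ := list_len5 r3 (hmr _ (by simp))
  obtain ⟨x40,x41,x42,x43,x44, rfl⟩ := list_len5 r4 (hmr _ (by simp))
  obtain ⟨c0,c1,c2,c3,c4, rfl⟩ := list_len5 rows hrl
  obtain ⟨d0,d1,d2,d3,d4, rfl⟩ := list_len5 cols hcl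
  have e00 : x00 = if cellA board 0 0 ∈ S then (1:Int) else 0 := by
    have := hent 0 0 (by norm_num) (by norm_num); simpa [Ent] using this
  subst e00
  have e01 : x01 = if cellA board 0 1 ∈ S then (1:Int) else 0 := by
    have := hent 0 1 (by norm_num) (by norm_num); simpa [Ent] using this
  subst e01
  have e02 : x02 = if cellA board 0 2 ∈ S then (1:Int) else 0 := by
    have := hent 0 2 (by norm_num) (by norm_num); simpa [Ent] using this
  subst e02
  have e03 : x03 = if cellA board 0 3 ∈ S then (1:Int) else 0 := by
    have := hent 0 3 (by norm_num) (by norm_num); simpa [Ent] using this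
  subst e03
  have e04 : x04 = if cellA board 0 4 ∈ S then (1:Int) else 0 := by
    have := hent 0 4 (by norm_num) (by norm_num); simpa [Ent] using this
  subst e04
  have e10 : x10 = if cellA board 1 0 ∈ S then (1:Int) else 0 := by
    have := hent 1 0 (by norm_num) (by norm_num); simpa [Ent] using this
  subst e10
  have e11 : x11 = if cellA board 1 1 ∈ S then (1:Int) else 0 := by
    have := hent 1 1 (by norm_num) (by norm_num); simpa [Ent] using this
  subst e11
  have e12 : x12 = if cellA board 1 2 ∈ S then (1:Int) else 0 := by
    have := hent 1 2 (by norm_num) (by norm_num); simpa [Ent] using this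
  subst e12
  have e13 : x13 = if cellA board 1 3 ∈ S then (1:Int) else 0 := by
    have := hent 1 3 (by norm_num) (by norm_num); simpa [Ent] using this
  subst e13
  have e14 : x14 = if cellA board 1 4 ∈ S then (1:Int) else 0 := by
    have := hent 1 4 (by norm_num) (by norm_num); simpa [Ent] using this
  subst e14
  have e20 : x20 = if cellA board 2 0 ∈ S then (1:Int) else 0 := by
    have := hent 2 0 (by norm_num) (by norm_num); simpa [Ent] using this
  subst e20
  have e21 : x21 = if cellA board 2 1 ∈ S then (1:Int) else 0 := by
    have := hent 2 1 (by norm_num) (by norm_num); simpa [Ent] using this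
  subst e21
  have e22 : x22 = if cellA board 2 2 ∈ S then (1:Int) else 0 := by
    have := hent 2 2 (by norm_num) (by norm_num); simpa [Ent] using this
  subst e22
  have e23 : x23 = if cellA board 2 3 ∈ S then (1:Int) else 0 := by
    have := hent 2 3 (by norm_num) (by norm_num); simpa [Ent] using this
  subst e23
  have e24 : x24 = if cellA board 2 4 ∈ S then (1:Int) else 0 := by
    have := hent 2 4 (by norm_num) (by norm_num); simpa [Ent] using this
  subst e24
  have e30 : x30 = if cellA board 3 0 ∈ S then (1:Int) else 0 := by
    have := hent 3 0 (by norm_num) (by norm_num); simpa [Ent] using this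
  subst e30
  have e31 : x31 = if cellA board 3 1 ∈ S then (1:Int) else 0 := by
    have := hent 3 1 (by norm_num) (by norm_num); simpa [Ent] using this
  subst e31
  have e32 : x32 = if cellA board 3 2 ∈ S then (1:Int) else 0 := by
    have := hent 3 2 (by norm_num) (by norm_num); simpa [Ent] using this
  subst e32
  have e33 : x33 = if cellA board 3 3 ∈ S then (1:Int) else 0 := by
    have := hent 3 3 (by norm_num) (by norm_num); simpa [Ent] using this
  subst e33
  have e34 : x34 = if cellA board 3 4 ∈ S then (1:Int) else 0 := by
    have := hent 3 4 (by norm_num) (by norm_num); simpa [Ent] using this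
  subst e34
  have e40 : x40 = if cellA board 4 0 ∈ S then (1:Int) else 0 := by
    have := hent 4 0 (by norm_num) (by norm_num); simpa [Ent] using this
  subst e40
  have e41 : x41 = if cellA board 4 1 ∈ S then (1:Int) else 0 := by
    have := hent 4 1 (by norm_num) (by norm_num); simpa [Ent] using this
  subst e41
  have e42 : x42 = if cellA board 4 2 ∈ S then (1:Int) else 0 := by
    have := hent 4 2 (by norm_num) (by norm_num); simpa [Ent] using this
  subst e42
  have e43 : x43 = if cellA board 4 3 ∈ S then (1:Int) else 0 := by
    have := hent 4 3 (by norm_num) (by norm_num); simpa [Ent] using this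
  subst e43
  have e44 : x44 = if cellA board 4 4 ∈ S then (1:Int) else 0 := by
    have := hent 4 4 (by norm_num) (by norm_num); simpa [Ent] using this
  subst e44
  have hc0 : c0 = rowCntQ (QS board S) 0 := by
    have := hrow 0 (by norm_num); simpa using this
  subst hc0
  have hc1 : c1 = rowCntQ (QS board S) 1 := by
    have := hrow 1 (by norm_num); simpa using this
  subst hc1
  have hc2 : c2 = rowCntQ (QS board S) 2 := by
    have := hrow 2 (by norm_num); simpa using this
  subst hc2
  have hc3 : c3 = rowCntQ (QS board S) 3 := by
    have := hrow 3 (by norm_num); simpa using this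
  subst hc3
  have hc4 : c4 = rowCntQ (QS board S) 4 := by
    have := hrow 4 (by norm_num); simpa using this
  subst hc4
  have hd0 : d0 = colCntQ (QS board S) 0 := by
    have := hcol 0 (by norm_num); simpa using this
  subst hd0
  have hd1 : d1 = colCntQ (QS board S) 1 := by
    have := hcol 1 (by norm_num); simpa using this
  subst hd1
  have hd2 : d2 = colCntQ (QS board S) 2 := by
    have := hcol 2 (by norm_num); simpa using this
  subst hd2
  have hd3 : d3 = colCntQ (QS board S) 3 := by
    have := hcol 3 (by norm_num); simpa using this
  subst hd3
  have hd4 : d4 = colCntQ (QS board S) 4 := by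
    have := hcol 4 (by norm_num); simpa using this
  subst hd4
  simp only [checkLoopA, rowCntQ, colCntQ, QS,
    show (List.range 5) = [0,1,2,3,4] from rfl, List.map_cons, List.map_nil,
    List.sum_cons, List.sum_nil, decide_eq_true_eq, show cellB = cellA from rfl]
  norm_num
  simp only [sum5d, sum5d']
  exact or_interleave _ _ _ _ _ _ _ _ _ _


-- A's final re-scan equals B's running unmarked sum
theorem sumA_eq (board m : List (List Int)) (S : PySem.Set Int) (hm : InvM board m S) :
    sum_unmarkedA board m = uSumQ board (QS board S) := by
  obtain ⟨⟨hml, hmr⟩, hent⟩ := hm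
  simp only [sum_unmarkedA]
  rw [PySem.List.foldl_congr_mem (List.range 5) _
        (fun (s : Int) (i : Nat) => s + ((List.range 5).map
            (fun j => if cellA board i j ∈ S then 0 else cellA board i j)).sum) 0
        (by
          intro acc i hi
          have hi5 : i < 5 := by simpa using hi
          rw [PySem.List.foldl_congr_mem (List.range 5) _
              (fun (s : Int) (j : Nat) => s + (if cellA board i j ∈ S then 0 else cellA board i j)) acc
              (by
                intro a j hj
                have hj5 : j < 5 := by simpa using hj
                have h := hent i j hi5 hj5
                unfold Ent at h
                rw [h]
                by_cases hp : cellA board i j ∈ S <;> simp [hp]),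
            PySem.List.foldl_add]),
      PySem.List.foldl_add]
  simp only [uSumQ, QS, show cellB = cellA from rfl, decide_eq_true_eq, zero_add]

-- the main loops agree step for step
theorem loop_eq (board : List (List Int)) :
    ∀ (rest : List Int) (m : List (List Int))
      (st : Int × List Int × List Int × PySem.Set (Nat × Nat)) (S : PySem.Set Int) (k : Int),
      InvM board m S → InvB board st (QS board S) →
      loopA board rest m k = loopB board rest k st := by
  intro rest
  induction rest with
  | nil => intro m st S k _ _; rfl
  | cons number rest ih =>
    intro m st S k hm hb
    have hm' := inv_mark board number m S hm
    have hb' := step_inv board number st S hb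
    obtain ⟨h1, h2, hmem, hrow, hcol, hu⟩ := hb'
    have hchk := checkEq board (markA board number m) (PySem.Set.add S number)
      (stepB board number st).2.1 (stepB board number st).2.2.1 hm' h1 h2 hrow hcol
    have hsum := sumA_eq board (markA board number m) (PySem.Set.add S number) hm'
    show (if 5 ≤ k then _ else _) = loopB board (number :: rest) k st
    by_cases h5 : 5 ≤ k
    · by_cases hbingo : checkLoopA (markA board number m) (markA board number m) 0 = true
      · simp only [loopB, if_pos h5]
        rw [if_pos hbingo]
        rw [if_pos ⟨h5, hchk ▸ hbingo⟩]
        exact congrArg _ (congrArg₂ _ (hsum.trans hu.symm) rfl)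
      · simp only [loopB, if_pos h5]
        rw [if_neg hbingo]
        rw [if_neg (by
          rintro ⟨_, hor⟩
          exact hbingo (hchk.trans hor))]
        exact ih _ _ _ _ hm' ⟨h1, h2, hmem, hrow, hcol, hu⟩
    · simp only [loopB]
      rw [if_neg h5]
      rw [if_neg (fun h => h5 h.1)]
      exact ih _ _ _ _ hm' ⟨h1, h2, hmem, hrow, hcol, hu⟩

theorem init_invM (board : List (List Int)) :
    InvM board ((List.range 5).map (fun _ => (List.range 5).map (fun _ => (0 : Int)))) PySem.Set.empty := by
  constructor
  · constructor
    · rfl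
    · intro r hr
      simp only [List.mem_map] at hr
      obtain ⟨_, _, rfl⟩ := hr
      rfl
  · intro i j hi hj
    have hmem : ¬ cellA board i j ∈ PySem.Set.empty := by simp [PySem.Set.empty]
    rw [if_neg hmem]
    interval_cases i <;> interval_cases j <;> rfl

-- ===== VERDICT (by name: the statement is the Claim_ definition above) =====
theorem play_bingo_spec : Claim_equal_play_bingo := by
  intro board numbers _ _
  unfold Spec_play_bingo
  unfold play_bingo play_bingo_alt
  exact loop_eq board numbers _ _ PySem.Set.empty 0 (init_invM board) (init_inv board)
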